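-- pv_equiv track=rewrite | github.com/F-Valentin/call_me_maybe | src/boolean_decoder.py | get_valid_next_tokens_boolean
-- ===== SOURCE A (Python) =====
-- def get_valid_next_tokens_boolean(
--     generated_so_far: str,
--     valid_values: list[str],
--     vocab: dict[int, str]
-- ) -> set[int]:
--     valid = set()
--
--     for token_id, token_str in vocab.items():
--         candidate = generated_so_far + token_str
--         if any(v.startswith(candidate) for v in valid_values):
--             valid.add(token_id)
--
--     return valid
-- ===== SOURCE B (Python) =====
-- def get_valid_next_tokens_boolean(
--     generated_so_far: str,
--     valid_values: list[str],
--     vocab: dict[int, str]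
-- ) -> set[int]:
--     # Collect every token string that can extend generated_so_far toward some
--     # valid value: the prefixes of each matching value's remaining suffix.
--     n = len(generated_so_far)
--     prefixes = set()
--     for v in valid_values:
--         if v.startswith(generated_so_far):
--             rest = v[n:]
--             for i in range(len(rest) + 1):
--                 prefixes.add(rest[:i])
--     return {token_id for token_id, token_str in vocab.items() if token_str in prefixes}
-- ===== Notes on version B (the rewrite author's own statement) =====
-- stated objective: faster
-- what changed: Instead of scanning all valid_values with startswith for every vocab token, B precomputes once the set of all prefixes of the matching values' remaining suffixes and then tests each vocab token by a single set membership.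
import Mathlib
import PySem

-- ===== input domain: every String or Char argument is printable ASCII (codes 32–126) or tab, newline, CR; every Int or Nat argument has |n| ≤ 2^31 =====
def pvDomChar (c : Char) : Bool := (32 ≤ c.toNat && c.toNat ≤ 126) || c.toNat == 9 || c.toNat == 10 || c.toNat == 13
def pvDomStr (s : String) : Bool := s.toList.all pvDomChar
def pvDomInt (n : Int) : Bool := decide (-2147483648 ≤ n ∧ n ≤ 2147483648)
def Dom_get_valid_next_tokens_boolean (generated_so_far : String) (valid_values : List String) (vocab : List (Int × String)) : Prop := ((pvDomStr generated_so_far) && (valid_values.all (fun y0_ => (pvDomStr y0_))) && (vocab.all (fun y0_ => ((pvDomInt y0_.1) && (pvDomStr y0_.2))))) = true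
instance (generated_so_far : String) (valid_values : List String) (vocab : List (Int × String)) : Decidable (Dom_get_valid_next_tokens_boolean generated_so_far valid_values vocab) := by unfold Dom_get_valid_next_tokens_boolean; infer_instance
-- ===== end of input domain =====

-- B replaces A's per-token scan of valid_values with a precomputed set of all
-- prefixes of the matching values' remaining suffixes (objective: faster).

-- ===== PORT A =====
def get_valid_next_tokens_boolean (generated_so_far : String) (valid_values : List String) (vocab : List (Int × String)) : List Int :=
  vocab.foldl (fun valid p =>
    let candidate := generated_so_far ++ p.2
    if valid_values.any (fun v => PySem.Str.startswith v candidate) then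
      PySem.Set.add valid p.1
    else valid) PySem.Set.empty

-- ===== PORT B =====
-- the `prefixes` set Source B builds before scanning vocab
def pvPrefixes (generated_so_far : String) (valid_values : List String) : PySem.Set String :=
  valid_values.foldl (fun pfx v =>
    if PySem.Str.startswith v generated_so_far then
      let rest := PySem.Str.slice v (some (PySem.Str.len generated_so_far)) none
      (PySem.List.pyRange 0 (PySem.Str.len rest + 1)).foldl
        (fun pfx i => PySem.Set.add pfx (PySem.Str.slice rest none (some i))) pfx
    else pfx) PySem.Set.empty

def get_valid_next_tokens_boolean_alt (generated_so_far : String) (valid_values : List String) (vocab : List (Int × String)) : List Int :=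
  let prefixes := pvPrefixes generated_so_far valid_values
  vocab.foldl (fun valid p =>
    if PySem.Set.contains prefixes p.2 then PySem.Set.add valid p.1 else valid) PySem.Set.empty

-- ===== PRECONDITION & SPEC =====
def Spec_get_valid_next_tokens_boolean (generated_so_far : String) (valid_values : List String) (vocab : List (Int × String)) (out : List Int) : Prop := out = get_valid_next_tokens_boolean_alt generated_so_far valid_values vocab
instance (generated_so_far : String) (valid_values : List String) (vocab : List (Int × String)) (out : List Int) : Decidable (Spec_get_valid_next_tokens_boolean generated_so_far valid_values vocab out) := by unfold Spec_get_valid_next_tokens_boolean; infer_instance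

-- ===== CLAIM (what is proved, stated in full; the proofs are below) =====
def Claim_equal_get_valid_next_tokens_boolean : Prop := ∀ (generated_so_far : String) (valid_values : List String) (vocab : List (Int × String)), Dom_get_valid_next_tokens_boolean generated_so_far valid_values vocab → Spec_get_valid_next_tokens_boolean generated_so_far valid_values vocab (get_valid_next_tokens_boolean generated_so_far valid_values vocab)

-- ===== LEMMAS AND PROOFS =====

-- a ++ b is a prefix of c iff a is, and b continues it right after a
theorem pv_append_prefix_iff (a b c : List Char) :
    a ++ b <+: c ↔ a <+: c ∧ b <+: c.drop a.length := by
  constructor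
  · rintro ⟨d, hd⟩
    subst hd
    refine ⟨⟨b ++ d, by simp⟩, ⟨d, ?_⟩⟩
    simp
  · rintro ⟨ha, ⟨e, he⟩⟩
    refine ⟨e, ?_⟩
    have hta : a = c.take a.length := List.prefix_iff_eq_take.mp ha
    calc a ++ b ++ e = a ++ (b ++ e) := by simp
    _ = c.take a.length ++ c.drop a.length := by rw [← hta, he]
    _ = c := List.take_append_drop _ _

-- membership in Source B's inner loop: t was added iff t is a prefix of rest
theorem pv_mem_inner (rest : String) (s : PySem.Set String) (t : String) :
    t ∈ (PySem.List.pyRange 0 (PySem.Str.len rest + 1)).foldl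
        (fun pfx i => PySem.Set.add pfx (PySem.Str.slice rest none (some i))) s
      ↔ t ∈ s ∨ t.toList <+: rest.toList := by
  rw [← PySem.Set.update_map_eq_foldl_add, PySem.Set.mem_update, List.mem_map]
  constructor
  · rintro (h | ⟨i, hi, hslice⟩)
    · exact Or.inl h
    · refine Or.inr ?_
      obtain ⟨h0, hlt⟩ := PySem.List.mem_pyRange_one.mp hi
      have : t.toList = rest.toList.take i.toNat := by
        rw [← hslice, PySem.Str.toList_slice, PySem.Chars.slice_eq_listSlice,
          PySem.List.slice_to _ h0]
      rw [this]
      exact List.take_prefix _ _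
  · rintro (h | hpre)
    · exact Or.inl h
    · refine Or.inr ⟨(t.toList.length : Int), ?_, ?_⟩
      · rw [PySem.List.mem_pyRange_one, PySem.Str.len_eq]
        have := hpre.length_le
        omega
      · apply String.toList_inj.mp
        rw [PySem.Str.toList_slice, PySem.Chars.slice_eq_listSlice]
        rw [show ((t.toList.length : Int)) = ((t.toList.length : Nat) : Int) from rfl]
        rw [PySem.List.slice_to_natCast]
        exact (List.prefix_iff_eq_take.mp hpre).symm

-- membership in Source B's outer loop, with a generalized accumulator
theorem pv_mem_fold (g : String) (vv : List String) (s : PySem.Set String) (t : String) :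
    t ∈ vv.foldl (fun pfx v =>
        if PySem.Str.startswith v g then
          (PySem.List.pyRange 0 (PySem.Str.len (PySem.Str.slice v (some (PySem.Str.len g)) none) + 1)).foldl
            (fun pfx i => PySem.Set.add pfx (PySem.Str.slice (PySem.Str.slice v (some (PySem.Str.len g)) none) none (some i))) pfx
        else pfx) s
      ↔ t ∈ s ∨ ∃ v ∈ vv, g.toList <+: v.toList ∧ t.toList <+: v.toList.drop g.toList.length := by
  induction vv generalizing s with
  | nil => simp
  | cons v vs ih =>
    rw [List.foldl_cons, ih]
    have hrest : (PySem.Str.slice v (some (PySem.Str.len g)) none).toList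
        = v.toList.drop g.toList.length := by
      rw [PySem.Str.toList_slice, PySem.Chars.slice_eq_listSlice, PySem.Str.len_eq,
        PySem.List.slice_from_natCast]
    by_cases hsw : PySem.Str.startswith v g = true
    · have hg : g.toList <+: v.toList := by
        rw [PySem.Str.startswith_eq, PySem.Chars.startswith_iff] at hsw; exact hsw
      rw [if_pos hsw, pv_mem_inner, hrest]
      simp only [List.mem_cons]
      constructor
      · rintro ((h | h) | ⟨w, hw, h1, h2⟩)
        · exact Or.inl h
        · exact Or.inr ⟨v, Or.inl rfl, hg, h⟩
        · exact Or.inr ⟨w, Or.inr hw, h1, h2⟩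
      · rintro (h | ⟨w, (rfl | hw), h1, h2⟩)
        · exact Or.inl (Or.inl h)
        · exact Or.inl (Or.inr h2)
        · exact Or.inr ⟨w, hw, h1, h2⟩
    · have hg : ¬ g.toList <+: v.toList := by
        rw [PySem.Str.startswith_eq, PySem.Chars.startswith_iff] at hsw; exact hsw
      rw [if_neg hsw]
      simp only [List.mem_cons]
      constructor
      · rintro (h | ⟨w, hw, h1, h2⟩)
        · exact Or.inl h
        · exact Or.inr ⟨w, Or.inr hw, h1, h2⟩
      · rintro (h | ⟨w, (rfl | hw), h1, h2⟩)
        · exact Or.inl h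
        · exact absurd h1 hg
        · exact Or.inr ⟨w, hw, h1, h2⟩

-- membership in Source B's prefixes set
theorem pv_mem_pvPrefixes (g : String) (vv : List String) (t : String) :
    t ∈ pvPrefixes g vv
      ↔ ∃ v ∈ vv, g.toList <+: v.toList ∧ t.toList <+: v.toList.drop g.toList.length := by
  rw [pvPrefixes, pv_mem_fold]
  simp [PySem.Set.empty]

-- the two per-token conditions agree
theorem pv_cond_eq (g : String) (vv : List String) (t : String) :
    (vv.any fun v => PySem.Str.startswith v (g ++ t))
      = PySem.Set.contains (pvPrefixes g vv) t := by
  apply Bool.coe_iff_coe.mp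
  rw [List.any_eq_true, PySem.Set.contains_iff, pv_mem_pvPrefixes]
  apply exists_congr
  intro v
  rw [PySem.Str.startswith_eq, PySem.Chars.startswith_iff, String.toList_append,
    pv_append_prefix_iff]

-- ===== VERDICT (by name: the statement is the Claim_ definition above) =====
theorem get_valid_next_tokens_boolean_spec : Claim_equal_get_valid_next_tokens_boolean := by
  intro g vv vocab _
  unfold Spec_get_valid_next_tokens_boolean get_valid_next_tokens_boolean
    get_valid_next_tokens_boolean_alt
  apply PySem.List.foldl_congr_mem
  intro acc x _
  simp only [pv_cond_eq]
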